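-- pv_equiv track=rewrite | github.com/necedemalis/dotfiles | lib/python/learning_with_python_3/Ex14-List_Alogrithms/Ex14.2-List_Alogrithms-8_Queens_Puzzle.py | prime_misses
-- ===== SOURCE A (Python) =====
-- def is_prime (n):
--     if n == 1 or n == 0:
--         return False
--     for i in range (2,n):
--         if n%i==0:
--             return False
--     return True
--
-- def remove_adjacent_dups(xs):
--     result = []
--     most_recent_elem = None
--     for e in xs:
--         if e != most_recent_elem:
--             result.append(e)
--             most_recent_elem = e
--     return result
--
-- def prime_misses (t):
--     p =[] #liste an primzahlen
--     l = [] #Gesamtliste Lottozahle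
--     mp = [] #Liste and fehlenden Primzahlen
--     for x in (range(50)):
--         if is_prime (x):
--             p.append(x)
--
--     for i in t:
--         l.extend (i)
--     l.sort ()
--     l = remove_adjacent_dups(l)
--     for i in p:
--         if l.count(i) ==0:
--             mp.append(i)
--     return mp
-- ===== SOURCE B (Python) =====
-- def _build_sieve():
--     sieve = [True] * 50
--     sieve[0] = sieve[1] = False
--     for i in range(2, 8):
--         if sieve[i]:
--             for m in range(i * i, 50, i):
--                 sieve[m] = False
--     return sieve
--
-- SIEVE = _build_sieve()
--
-- def prime_misses(t):
--     seen = set()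
--     for row in t:
--         seen.update(row)
--     return [p for p in range(50) if SIEVE[p] and p not in seen]
-- ===== Notes on version B (the rewrite author's own statement) =====
-- stated objective: faster
-- what changed: Trial-division is_prime over range(50) is replaced by a precomputed Sieve of Eratosthenes table, and the sort/remove_adjacent_dups/count pipeline is replaced by one hash set of the flattened numbers with O(1) membership tests.
import Mathlib
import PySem

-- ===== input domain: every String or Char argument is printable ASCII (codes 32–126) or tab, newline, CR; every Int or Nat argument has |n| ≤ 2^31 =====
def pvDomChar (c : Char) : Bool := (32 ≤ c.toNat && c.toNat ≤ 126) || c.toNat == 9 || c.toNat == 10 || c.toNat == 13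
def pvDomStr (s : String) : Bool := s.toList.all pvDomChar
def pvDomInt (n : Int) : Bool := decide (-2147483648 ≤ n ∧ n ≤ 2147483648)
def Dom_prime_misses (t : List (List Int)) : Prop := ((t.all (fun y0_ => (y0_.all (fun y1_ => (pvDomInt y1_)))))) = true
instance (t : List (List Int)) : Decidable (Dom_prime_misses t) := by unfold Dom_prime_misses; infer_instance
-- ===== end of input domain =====

-- B replaces trial-division prime testing by a precomputed Sieve of Eratosthenes table
-- and the sort/remove_adjacent_dups/count pipeline by one hash set of the flattened numbers, avoiding A's sort (objective: faster).

-- ===== PORT A =====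
def is_prime (n : Int) : Bool :=
  if n == 1 || n == 0 then false
  else !((PySem.List.pyRange 2 n 1).any (fun i => PySem.Int.mod n i == 0))

def remove_adjacent_dups (xs : List Int) : List Int :=
  (xs.foldl (fun (st : List Int × Option Int) e =>
      if some e != st.2 then (st.1 ++ [e], some e) else st) ([], none)).1

def prime_misses (t : List (List Int)) : List Int :=
  let p := (PySem.List.pyRange 0 50 1).foldl
      (fun acc x => if is_prime x then acc ++ [x] else acc) []
  let l := t.foldl (fun acc i => acc ++ i) []
  let l := PySem.List.sorted l (fun x => x) false
  let l := remove_adjacent_dups l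
  p.foldl (fun mp i => if PySem.List.count l i == 0 then mp ++ [i] else mp) []

-- ===== PORT B =====
-- module-level sieve table of Source B (Sieve of Eratosthenes up to 50)
def pvSieve : List Bool :=
  let sieve := List.replicate 50 true
  let sieve := PySem.List.pySetD (PySem.List.pySetD sieve 0 false) 1 false
  (PySem.List.pyRange 2 8 1).foldl (fun sv i =>
      if PySem.List.pyGetD sv i false then
        (PySem.List.pyRange (i * i) 50 i).foldl (fun sv2 m => PySem.List.pySetD sv2 m false) sv
      else sv) sieve

def prime_misses_alt (t : List (List Int)) : List Int :=
  let seen := t.foldl (fun s row => PySem.Set.update s row) PySem.Set.empty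
  (PySem.List.pyRange 0 50 1).filter
      (fun p => PySem.List.pyGetD pvSieve p false && !(PySem.Set.contains seen p))

-- ===== PRECONDITION & SPEC =====
def Spec_prime_misses (t : List (List Int)) (out : List Int) : Prop := out = prime_misses_alt t
instance (t : List (List Int)) (out : List Int) : Decidable (Spec_prime_misses t out) := by unfold Spec_prime_misses; infer_instance

-- ===== CLAIM (what is proved, stated in full; the proofs are below) =====
def Claim_equal_prime_misses : Prop := ∀ (t : List (List Int)), Dom_prime_misses t → Spec_prime_misses t (prime_misses t)

-- ===== LEMMAS AND PROOFS =====

-- membership in remove_adjacent_dups (invariant: the remembered element is already in the result)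
theorem mem_rad_aux (xs : List Int) (r : List Int) (m : Option Int)
    (hm : ∀ v, m = some v → v ∈ r) (x : Int) :
    (x ∈ (xs.foldl (fun (st : List Int × Option Int) e =>
        if some e != st.2 then (st.1 ++ [e], some e) else st) (r, m)).1) ↔ x ∈ r ∨ x ∈ xs := by
  induction xs generalizing r m with
  | nil => simp
  | cons e rest ih =>
    simp only [List.foldl_cons]
    by_cases h : (some e != m) = true
    · rw [if_pos h]
      rw [ih (r ++ [e]) (some e) (by intro v hv; simp at hv; simp [hv])]
      simp only [List.mem_append, List.mem_cons]
      tauto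
    · rw [if_neg h]
      have hme : m = some e := by
        cases m with
        | none => simp at h
        | some v => simp at h; simp [h]
      have her : e ∈ r := hm e hme
      rw [ih r m hm]
      simp only [List.mem_cons]
      constructor
      · tauto
      · rintro (hr | he | hrest)
        · exact Or.inl hr
        · exact Or.inl (he ▸ her)
        · exact Or.inr hrest

theorem mem_rad (xs : List Int) (x : Int) : x ∈ remove_adjacent_dups xs ↔ x ∈ xs := by
  unfold remove_adjacent_dups
  rw [mem_rad_aux xs [] none (by simp) x]
  simp

-- membership in the fold of Set.update
theorem mem_seen_aux (t : List (List Int)) (s : List Int) (x : Int) :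
    (x ∈ t.foldl (fun s row => PySem.Set.update s row) s) ↔ x ∈ s ∨ ∃ row ∈ t, x ∈ row := by
  induction t generalizing s with
  | nil => simp
  | cons row rest ih =>
    simp only [List.foldl_cons, ih, PySem.Set.mem_update]
    constructor
    · rintro ((h | h) | ⟨r, hr, hx⟩)
      · exact Or.inl h
      · exact Or.inr ⟨row, by simp, h⟩
      · exact Or.inr ⟨r, by simp [hr], hx⟩
    · rintro (h | ⟨r, hr, hx⟩)
      · exact Or.inl (Or.inl h)
      · rcases List.mem_cons.mp hr with h' | h'
        · exact Or.inl (Or.inr (h' ▸ hx))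
        · exact Or.inr ⟨r, h', hx⟩

-- the list of primes below 50 both programs produce
def pvPrimes : List Int := [2, 3, 5, 7, 11, 13, 17, 19, 23, 29, 31, 37, 41, 43, 47]

set_option maxRecDepth 8192 in
theorem primesA :
    ((PySem.List.pyRange 0 50 1).foldl
      (fun acc x => if is_prime x then acc ++ [x] else acc) ([] : List Int)) = pvPrimes := by
  decide

set_option maxRecDepth 8192 in
theorem primesSieve : (PySem.List.pyRange 0 50 1).filter
    (fun p => PySem.List.pyGetD pvSieve p false) = pvPrimes := by
  decide

-- peeling the sieve test off B's comprehension: what survives the sieve is pvPrimes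
theorem filter_sieve (f : Int → Bool) :
    (PySem.List.pyRange 0 50 1).filter (fun p => PySem.List.pyGetD pvSieve p false && f p)
      = pvPrimes.filter f := by
  have h1 : (PySem.List.pyRange 0 50 1).filter
        (fun p => PySem.List.pyGetD pvSieve p false && f p)
      = (PySem.List.pyRange 0 50 1).filter
        (fun p => f p && PySem.List.pyGetD pvSieve p false) :=
    List.filter_congr (fun x _ => Bool.and_comm _ _)
  rw [h1, ← List.filter_filter, primesSieve]

theorem prime_misses_spec_aux (t : List (List Int)) : prime_misses t = prime_misses_alt t := by
  unfold prime_misses prime_misses_alt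
  simp only [primesA]
  rw [PySem.List.foldl_append_if_eq_filter, filter_sieve]
  simp only [List.nil_append]
  apply List.filter_congr
  intro x _
  have hmem : (x ∈ remove_adjacent_dups
      (PySem.List.sorted (t.foldl (fun acc i => acc ++ i) []) (fun x => x) false)) ↔
      x ∈ t.foldl (fun s row => PySem.Set.update s row) ([] : List Int) := by
    rw [mem_rad, PySem.List.mem_sorted, mem_seen_aux]
    rw [show (t.foldl (fun acc i => acc ++ i) ([] : List Int))
        = [] ++ t.flatMap (fun i => i) from PySem.List.foldl_append_eq_flatMap _ _ _]
    simp
  rw [PySem.List.count_eq]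
  by_cases hx : x ∈ t.foldl (fun s row => PySem.Set.update s row) ([] : List Int)
  · have h1 := hmem.mpr hx
    have h2 : List.count x (remove_adjacent_dups
        (PySem.List.sorted (t.foldl (fun acc i => acc ++ i) []) (fun x => x) false)) ≠ 0 := by
      simpa [List.count_eq_zero] using h1
    simp [h2, hx]
  · have h1 : x ∉ remove_adjacent_dups
        (PySem.List.sorted (t.foldl (fun acc i => acc ++ i) []) (fun x => x) false) :=
      fun h' => hx (hmem.mp h')
    have h2 := List.count_eq_zero.mpr h1
    simp [h2, hx]

-- ===== VERDICT (by name: the statement is the Claim_ definition above) =====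
theorem prime_misses_spec : Claim_equal_prime_misses := by
  intro t _
  exact prime_misses_spec_aux t
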